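-- pv_equiv track=rewrite | github.com/daniel-havely/advent-of-code | 2025/Day10/test.py | genCombo
-- ===== SOURCE A (Python) =====
-- def genCombo(but_ranges, but_jolts, total_jolts):
--     if len(but_ranges) > 1:
--         but_ranges = but_ranges.copy()
--         current_range = but_ranges.pop()
--         but_jolts = but_jolts.copy()
--         current_jolts = but_jolts.pop()
--
--         return [
--             ([*result, a], joltage + (a*current_jolts))
--             for a in current_range
--             for result, joltage in (genCombo(but_ranges, but_jolts, total_jolts ))
--             if joltage <= total_jolts
--             ]
--     else:
--         return  (([r], r*but_jolts[0]) for r in but_ranges[0])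
-- ===== SOURCE B (Python) =====
-- def genCombo(but_ranges, but_jolts, total_jolts):
--     if len(but_ranges) <= 1:
--         return [([r], r * but_jolts[0]) for r in but_ranges[0]]
--     survivors = [cj for cj in genCombo(but_ranges[:-1], but_jolts[:-1], total_jolts)
--                  if cj[1] <= total_jolts]
--     jolt = but_jolts[-1]
--     return [(combo + [a], j + a * jolt)
--             for a in but_ranges[-1]
--             for combo, j in survivors]
-- ===== Notes on version B (the rewrite author's own statement) =====
-- stated objective: alternative
-- what changed: B binds the recursive subresult once and filters it once per level instead of A's comprehension that re-runs the entire recursive call for every value of the current range; Pre_ excludes inputs with no range or fewer jolt values than ranges, on which A raises IndexError except when an empty range cuts its lazy recursion short and B's eager recursion raises.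
-- outside the precondition, e.g. on genCombo([[2], []], [5], 10): A returns [], B raises IndexError
import Mathlib
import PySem

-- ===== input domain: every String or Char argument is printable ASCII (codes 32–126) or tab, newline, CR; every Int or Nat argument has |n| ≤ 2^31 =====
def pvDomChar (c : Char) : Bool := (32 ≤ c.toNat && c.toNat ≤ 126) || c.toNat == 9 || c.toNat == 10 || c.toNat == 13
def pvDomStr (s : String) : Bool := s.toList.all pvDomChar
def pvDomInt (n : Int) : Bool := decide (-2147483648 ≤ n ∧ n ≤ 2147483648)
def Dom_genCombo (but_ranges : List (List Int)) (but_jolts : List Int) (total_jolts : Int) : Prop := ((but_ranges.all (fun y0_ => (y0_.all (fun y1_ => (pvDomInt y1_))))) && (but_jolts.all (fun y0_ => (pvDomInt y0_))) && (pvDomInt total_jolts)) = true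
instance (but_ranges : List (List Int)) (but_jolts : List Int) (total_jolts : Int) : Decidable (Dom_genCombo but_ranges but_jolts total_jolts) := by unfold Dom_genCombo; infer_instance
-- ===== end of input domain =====

-- B computes each recursive subresult once and filters it once, instead of A's comprehension
-- that re-runs the whole recursive call for every value of the current range (objective: alternative).

-- ===== PORT A =====
-- Port of A. The `.pop()`s become getLastD/dropLast (the defaults are never taken inside Pre_,
-- where both lists are nonempty). A's base case returns a lazy generator in Python; it is
-- ported as the list that generator yields, which is how A's own recursion consumes it.
-- A's comprehension re-evaluates the recursive call for each `a`; written literally inside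
-- the lambda so the port has the same shape.
def genCombo (but_ranges : List (List Int)) (but_jolts : List Int) (total_jolts : Int) : List (List Int × Int) :=
  if h : 1 < but_ranges.length then
    let current_range := but_ranges.getLastD []
    let but_ranges' := but_ranges.dropLast
    let current_jolts := but_jolts.getLastD 0
    let but_jolts' := but_jolts.dropLast
    current_range.flatMap (fun a =>
      (genCombo but_ranges' but_jolts' total_jolts).filterMap (fun rj =>
        if rj.2 ≤ total_jolts then some (rj.1 ++ [a], rj.2 + a * current_jolts) else none))
  else
    (but_ranges.getD 0 []).map (fun r => ([r], r * but_jolts.getD 0 0))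
termination_by but_ranges.length
decreasing_by simp; omega

-- ===== PORT B =====
-- Port of B (Source B): the recursive subresult is bound once (`survivors`), filtered once,
-- and reused for every value of the last range.
def genCombo_alt (but_ranges : List (List Int)) (but_jolts : List Int) (total_jolts : Int) : List (List Int × Int) :=
  if h : but_ranges.length ≤ 1 then
    (but_ranges.getD 0 []).map (fun r => ([r], r * but_jolts.getD 0 0))
  else
    let survivors := (genCombo_alt but_ranges.dropLast but_jolts.dropLast total_jolts).filter
      (fun cj => cj.2 ≤ total_jolts)
    let jolt := but_jolts.getLastD 0
    (but_ranges.getLastD []).flatMap (fun a =>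
      survivors.map (fun cj => (cj.1 ++ [a], cj.2 + a * jolt)))
termination_by but_ranges.length
decreasing_by simp; omega

-- ===== PRECONDITION & SPEC =====
-- Pre_ excludes inputs with no range, or with fewer jolt values than ranges: there A raises
-- IndexError (pop / [0] on an exhausted jolt list) except when an empty range happens to cut
-- the recursion short before the failing subcall, and B's eager recursion raises.
def Pre_genCombo (but_ranges : List (List Int)) (but_jolts : List Int) (total_jolts : Int) : Prop :=
  1 ≤ but_ranges.length ∧ but_ranges.length ≤ but_jolts.length
instance (but_ranges : List (List Int)) (but_jolts : List Int) (total_jolts : Int) : Decidable (Pre_genCombo but_ranges but_jolts total_jolts) := by unfold Pre_genCombo; infer_instance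
def pvWitness_genCombo : List (List Int) × List Int × Int := ([[1, 2], [0, 3]], [2, 5], 100)
def Spec_genCombo (but_ranges : List (List Int)) (but_jolts : List Int) (total_jolts : Int) (out : List (List Int × Int)) : Prop := out = genCombo_alt but_ranges but_jolts total_jolts
instance (but_ranges : List (List Int)) (but_jolts : List Int) (total_jolts : Int) (out : List (List Int × Int)) : Decidable (Spec_genCombo but_ranges but_jolts total_jolts out) := by unfold Spec_genCombo; infer_instance

-- ===== CLAIM (what is proved, stated in full; the proofs are below) =====
def Claim_equal_genCombo : Prop := ∀ (but_ranges : List (List Int)) (but_jolts : List Int) (total_jolts : Int), Dom_genCombo but_ranges but_jolts total_jolts → Pre_genCombo but_ranges but_jolts total_jolts → Spec_genCombo but_ranges but_jolts total_jolts (genCombo but_ranges but_jolts total_jolts)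

-- ===== LEMMAS AND PROOFS =====
-- A's `filterMap` with an if-guard is B's `filter` followed by `map`.
lemma filterMap_if_le (l : List (List Int × Int)) (t : Int) (f : List Int × Int → List Int × Int) :
    l.filterMap (fun rj => if rj.2 ≤ t then some (f rj) else none)
      = (l.filter (fun rj => rj.2 ≤ t)).map f := by
  induction l with
  | nil => rfl
  | cons x xs ih => by_cases h : x.2 ≤ t <;> simp [h, ih]

lemma genCombo_eq_alt : ∀ (n : Nat) (br : List (List Int)) (bj : List Int) (t : Int),
    br.length = n → 1 ≤ n → genCombo br bj t = genCombo_alt br bj t := by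
  intro n
  induction n with
  | zero => intro br bj t _ h; omega
  | succ m ih =>
    intro br bj t hlen h1
    by_cases hm : m = 0
    · subst hm
      rw [genCombo, dif_neg (by omega), genCombo_alt, dif_pos (by omega)]
    · rw [genCombo, dif_pos (by omega), genCombo_alt, dif_neg (by omega)]
      dsimp only
      rw [ih br.dropLast bj.dropLast t (by simp; omega) (by omega)]
      simp only [filterMap_if_le]

-- ===== VERDICT (by name: the statement is the Claim_ definition above) =====
theorem genCombo_spec : Claim_equal_genCombo := by
  intro br bj t _ hpre
  exact genCombo_eq_alt br.length br bj t rfl hpre.1
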